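/-
  THE BLOCKS CONFIG READS DO NOT CHANGE: `ConfigOK.reads_back`, and the sample-buffer pointers: `ConfigOK.buffers_eq`.

  `ConfigOK.Reads mem f B` says "`B` is one of the blocks whose content the CONFIG part reads in the state `(mem, f)`". Every such
  block is an expression in pointers, counts and sizes that are read inside the windows `ConfigOK.wins` of `*f` or inside blocks
  that `ConfigOK.Reads` itself lists. So when the windows of `(mem', f)` read as those of `(mem, p)` and the blocks read in
  `(mem, p)` are kept, the blocks read in `(mem', f)` are the SAME blocks:

      ConfigOK.reads_back (h : ConfigOK Blk mem p) (he : ObjEq ConfigOK.wins mem p mem' f)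
          (hk : ∀ B, ConfigOK.Reads mem p B → B.Kept mem mem') (hR : ConfigOK.Reads mem' f B) : ConfigOK.Reads mem p B

  (the hypotheses of `ConfigOK.transfer`). It is what carries the separation clause `Separated` over a batch of decode-time stores.
  One helper per group, each in the owner's namespace:

      CommentOK.reads_back           the table of comment pointers                     (window `[24, 48)`)
      ConfigOK.codebooksBlock_eq     the codebooks block                               (window `[160, 176)`)
      ConfigOK.svBlock_eq            the `sorted_values` block of book `i`             (through the kept codebooks block)
      ConfigOK.clBlock_eq            the `codeword_lengths` block of book `i`          (through the kept codebooks block)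
      ResidueOK.reads_record         the reads of residue record `i` follow the object (what `ResidueUpTo.transfer_below` does inline)
      ResidueOK.owns_back            `residue_config`, and `residue_books`, `classdata`, the rows of every record
      Mapping.chan_kept              `m->chan` through the kept record
      MappingOK.owns_back            the mapping table and every `chan` block
      Mdct.MdctOK.reads_back         the two bit-reverse tables                        (windows `[144, 160)`, `[1400, 1480)`)

      ConfigOK.buffers_eq            `channels`, `bsize 1`, `channel_buffers[c]`, `previous_window[c]`, `finalY[c]` follow the object
-/
import Vorbis.Invariant.Config
namespace Vorbis
open X86 X86.User Asan

/-! ### Comments -/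

/-- **The comment table read in the new state is the comment table of the old one**: `comment_list` and `comment_list_length`
are fields of `*f` inside the window `[24, 48)`. -/
theorem CommentOK.reads_back {mem mem' : Mem} {p f : Nat} (he : ObjEq CommentOK.wins mem p mem' f) {B : Block}
    (hR : CommentOK.Reads mem' f B) : CommentOK.Reads mem p B := by
  have en : stb_vorbis.comment_list_length mem' f = stb_vorbis.comment_list_length mem p := by
    simp only [vacc, voff]
    exact he.i32 32 (by decide)
  have el : stb_vorbis.comment_list mem' f = stb_vorbis.comment_list mem p := by
    simp only [vacc, voff]
    exact he.u64 40 (by decide)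
  cases hR with
  | table hpos =>
    rw [en] at hpos
    rw [en, el]
    exact CommentOK.Reads.table hpos

/-! ### Codebooks -/

/-- **The codebooks block is the same block in the two states**: `codebooks` and `codebook_count` are fields of `*f` inside the
window `[160, 176)`. -/
theorem ConfigOK.codebooksBlock_eq {mem mem' : Mem} {p f : Nat} (he : ObjEq ConfigOK.wins mem p mem' f) :
    codebooksBlock mem' f = codebooksBlock mem p := by
  obtain ⟨ecbs, ecnt⟩ := ConfigOK.codebooks_eq he
  unfold codebooksBlock
  rw [ecbs, ecnt]

/-- The address of codebook `i` is the same in the two states. -/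
theorem ConfigOK.codebooks_at_eq {mem mem' : Mem} {p f : Nat} (he : ObjEq ConfigOK.wins mem p mem' f) (i : Nat) :
    stb_vorbis.codebooks_at mem' f i = stb_vorbis.codebooks_at mem p i := by
  obtain ⟨ecbs, _⟩ := ConfigOK.codebooks_eq he
  unfold stb_vorbis.codebooks_at
  rw [ecbs]

/-- **The `sorted_values` block of codebook `i` is the same block in the two states, and so is its `sorted_entries`**: the struct
of book `i` lies inside the codebooks block, which is kept, so its fields `sorted_values` and `sorted_entries` read the same. -/
theorem ConfigOK.svBlock_eq {Blk : Block → Prop} {mem mem' : Mem} {p f : Nat} (h : ConfigOK Blk mem p)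
    (he : ObjEq ConfigOK.wins mem p mem' f) (hcbk : (codebooksBlock mem p).Kept mem mem') (i : Nat)
    (hi : (i : Int) < stb_vorbis.codebook_count mem p) :
    Codebook.svBlock mem' (stb_vorbis.codebooks_at mem' f i) = Codebook.svBlock mem (stb_vorbis.codebooks_at mem p i) ∧
      Codebook.sorted_entries mem' (stb_vorbis.codebooks_at mem' f i)
        = Codebook.sorted_entries mem (stb_vorbis.codebooks_at mem p i) := by
  have hbook : (Codebook.block (stb_vorbis.codebooks_at mem p i)).Kept mem mem' := h.cb0.cb_kept hcbk i hi
  have sf : Codebook.SameFields mem mem' (stb_vorbis.codebooks_at mem p i) := Codebook.SameFields.of_kept hbook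
  rw [ConfigOK.codebooks_at_eq he i]
  constructor
  · unfold Codebook.svBlock
    rw [sf.sorted_values, sf.sorted_entries]
  · exact sf.sorted_entries

/-- **The `codeword_lengths` block of codebook `i` is the same block in the two states**: the pointer `codeword_lengths` and the
fields behind N(c) (`sparse`, `entries`, `sorted_entries`) are read inside the struct of book `i`, a part of the kept codebooks
block. -/
theorem ConfigOK.clBlock_eq {Blk : Block → Prop} {mem mem' : Mem} {p f : Nat} (h : ConfigOK Blk mem p)
    (he : ObjEq ConfigOK.wins mem p mem' f) (hcbk : (codebooksBlock mem p).Kept mem mem') (i : Nat)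
    (hi : (i : Int) < stb_vorbis.codebook_count mem p) :
    Codebook.clBlock mem' (stb_vorbis.codebooks_at mem' f i) = Codebook.clBlock mem (stb_vorbis.codebooks_at mem p i) := by
  have hbook : (Codebook.block (stb_vorbis.codebooks_at mem p i)).Kept mem mem' := h.cb0.cb_kept hcbk i hi
  have sf : Codebook.SameFields mem mem' (stb_vorbis.codebooks_at mem p i) := Codebook.SameFields.of_kept hbook
  rw [ConfigOK.codebooks_at_eq he i]
  exact sf.clBlock

/-! ### Residues -/

/-- **The reads of residue record `i < residue_count` follow the object**: the record's 32 bytes are a part of the kept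
`residue_config` block, the header of its class book is a part of the kept codebooks block (R7), `codebook_count` and
`codebooks` are fields of `*f`. (This is the step `ResidueUpTo.transfer_below` performs for every record.) -/
theorem ResidueOK.reads_record {Blk : Block → Prop} {mem mem' : Mem} {p f : Nat} (h : ResidueOK Blk mem p)
    (he : ObjEq ResidueOK.wins mem p mem' f)
    (hconf : (Block.mk (stb_vorbis.residue_config mem p)
      (Off.sizeof.Residue * (stb_vorbis.residue_count mem p).toNat)).Kept mem mem')
    (hcb : (Block.mk (stb_vorbis.codebooks mem p)
      (Off.sizeof.Codebook * (stb_vorbis.codebook_count mem p).toNat)).Kept mem mem')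
    (i : Nat) (hi : (i : Int) < stb_vorbis.residue_count mem p) :
    ResidueReads mem p mem' f (stb_vorbis.residue_config_at mem p i) := by
  have h7 := (h.record i hi).R7
  -- the record's 32 bytes: a part of the config block
  have hr : (Block.mk (stb_vorbis.residue_config_at mem p i) Off.sizeof.Residue).Kept mem mem' := by
    apply hconf.mono
    · simp only [vacc, voff]
      omega
    · simp only [vacc, voff] at hi ⊢
      omega
  -- the class book's header: a part of the codebooks block
  have hcbk : (Block.mk (Residue.cbk mem p (stb_vorbis.residue_config_at mem p i)) 8).Kept mem mem' := by
    apply hcb.mono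
    · simp only [vacc, voff]
      omega
    · simp only [vacc, voff] at h7 ⊢
      omega
  exact ResidueReads.of_kept (he.sub (by decide)) hr hcbk

/-- **A block the residues own in the new state is a block they own in the old one**: `residue_config` and `residue_count` are
fields of `*f` (window `[320, 464)`); for record `i` the pointers `residue_books`, `classdata`, the sizes `classifications`, `E`,
`W` read the same (`ResidueOK.reads_record`), and the row pointers `classdata[q]` are read inside the kept `classdata` block. -/
theorem ResidueOK.owns_back {Blk : Block → Prop} {mem mem' : Mem} {p f : Nat} (h : ResidueOK Blk mem p)
    (he : ObjEq ResidueOK.wins mem p mem' f) (hk : ∀ B, ResidueOK.Reads mem p B → B.Kept mem mem') {B : Block}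
    (hO : ResidueOK.Owns mem' f B) : ResidueOK.Owns mem p B := by
  have ecount : stb_vorbis.residue_count mem' f = stb_vorbis.residue_count mem p := by
    simp only [vacc, voff]
    exact he.i32 320 (by decide)
  have econf : stb_vorbis.residue_config mem' f = stb_vorbis.residue_config mem p := by
    simp only [vacc, voff]
    exact he.u64 456 (by decide)
  have hconf := hk _ (ResidueOK.Reads.owns ResidueOK.Owns.config)
  have hcb := hk _ ResidueOK.Reads.codebooks
  cases hO with
  | config =>
    rw [econf, ecount]
    exact ResidueOK.Owns.config
  | record i hi B hB =>
    rw [ecount] at hi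
    have hi' : (i : Int) < stb_vorbis.residue_count mem p := by omega
    have eat : stb_vorbis.residue_config_at mem' f i = stb_vorbis.residue_config_at mem p i := by
      unfold stb_vorbis.residue_config_at
      rw [econf]
    rw [eat] at hB
    have hrd := h.reads_record he hconf hcb i hi'
    cases hB with
    | books =>
      rw [hrd.residue_books, hrd.classifications]
      exact ResidueOK.Owns.record i hi' _ ResidueAtOK.Owns.books
    | classdata =>
      rw [hrd.classdata, hrd.E]
      exact ResidueOK.Owns.record i hi' _ ResidueAtOK.Owns.classdata
    | row q hq =>
      rw [hrd.E] at hq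
      have hcd := hk _ (ResidueOK.Reads.owns (ResidueOK.Owns.record i hi' _ ResidueAtOK.Owns.classdata))
      rw [Residue.row_kept hrd hcd hq, hrd.W]
      exact ResidueOK.Owns.record i hi' _ (ResidueAtOK.Owns.row q hq)

/-! ### Mappings -/

/-- The pointer `m->chan` reads the same when the 56 bytes of the mapping record at `m` are kept. -/
theorem Mapping.chan_kept {mem mem' : Mem} {m : Nat} (hm : (Block.mk m Off.sizeof.Mapping).Kept mem mem') :
    Mapping.chan mem' m = Mapping.chan mem m := by
  simp only [vacc, voff]
  exact hm.u64 _ (by simp only []; omega) (by simp only [voff]; omega)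

/-- **A block the mappings own in the new state is a block they own in the old one**: `mapping`, `mapping_count`, `channels`
are fields of `*f` (windows `[464, 480)`, `[4, 8)`); `chan` of record `i` is read inside the kept mapping table. -/
theorem MappingOK.owns_back {mem mem' : Mem} {p f : Nat} (he : ObjEq MappingOK.wins mem p mem' f)
    (htab : (Block.mk (stb_vorbis.mapping mem p)
      (Off.sizeof.Mapping * (stb_vorbis.mapping_count mem p).toNat)).Kept mem mem') {B : Block}
    (hO : MappingOK.Owns mem' f B) : MappingOK.Owns mem p B := by
  have ecount : stb_vorbis.mapping_count mem' f = stb_vorbis.mapping_count mem p := by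
    simp only [vacc, voff]
    exact he.i32 464 (by decide)
  have etab : stb_vorbis.mapping mem' f = stb_vorbis.mapping mem p := by
    simp only [vacc, voff]
    exact he.u64 472 (by decide)
  have eC : stb_vorbis.channels mem' f = stb_vorbis.channels mem p := by
    simp only [vacc, voff]
    exact he.i32 4 (by decide)
  have en : nchan mem' f = nchan mem p := by
    rw [nchan_def, nchan_def, eC]
  cases hO with
  | table =>
    rw [etab, ecount]
    exact MappingOK.Owns.table
  | chan i hi =>
    rw [ecount] at hi
    have eat : stb_vorbis.mapping_at mem' f i = stb_vorbis.mapping_at mem p i := by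
      unfold stb_vorbis.mapping_at
      rw [etab]
    -- the record's 56 bytes: a part of the mapping table
    have hm : (Block.mk (stb_vorbis.mapping_at mem p i) Off.sizeof.Mapping).Kept mem mem' := by
      apply htab.mono
      · simp only [vacc, voff]
        omega
      · simp only [vacc, voff] at hi ⊢
        omega
    rw [eat, Mapping.chan_kept hm, en]
    exact MappingOK.Owns.chan i (by omega)

/-! ### The MDCT tables -/

/-- **A bit-reverse table read in the new state is the one read in the old state**: the pointer `bit_reverse[b]` is in the window
`[1400, 1480)`, its size is `bsize b / 4` and `blocksize_0`, `blocksize_1` are in the window `[144, 160)`. -/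
theorem Mdct.MdctOK.reads_back {mem mem' : Mem} {p f : Nat} (he : ObjEq Mdct.MdctOK.wins mem p mem' f) {B : Block}
    (hR : Mdct.MdctOK.Reads mem' f B) : Mdct.MdctOK.Reads mem p B := by
  have e0 : stb_vorbis.blocksize_0 mem' f = stb_vorbis.blocksize_0 mem p := by
    simp only [vacc, voff]
    exact he.i32 _ (by decide)
  have e1 : stb_vorbis.blocksize_1 mem' f = stb_vorbis.blocksize_1 mem p := by
    simp only [vacc, voff]
    exact he.i32 _ (by decide)
  cases hR with
  | bit_reverse b hb =>
    have eR : stb_vorbis.bit_reverse mem' f b = stb_vorbis.bit_reverse mem p b := by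
      simp only [vacc, voff]
      exact he.u64_elem 1400 1480 (by decide) _ _ (by omega) (by omega)
    rw [eR, bsize_congr e0 e1 b]
    exact Mdct.MdctOK.Reads.bit_reverse b hb

/-! ### CONFIG -/

/-- **The blocks CONFIG reads in the new state ARE blocks it read in the old one**: the configuration's pointers and sizes did not
change (they are read inside the windows `ConfigOK.wins` of `*f` and inside kept blocks). This is what carries the separation
clause `Separated` over a batch of decode-time stores. -/
theorem ConfigOK.reads_back {Blk : Block → Prop} {mem mem' : Mem} {p f : Nat} (h : ConfigOK Blk mem p)
    (he : ObjEq ConfigOK.wins mem p mem' f) (hk : ∀ B, ConfigOK.Reads mem p B → B.Kept mem mem') {B : Block}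
    (hR : ConfigOK.Reads mem' f B) : ConfigOK.Reads mem p B := by
  have hcbk : (codebooksBlock mem p).Kept mem mem' := hk _ ConfigOK.Reads.codebooks
  cases hR with
  | comment hc =>
    exact ConfigOK.Reads.comment (CommentOK.reads_back (he.sub (by decide)) hc)
  | codebooks =>
    rw [ConfigOK.codebooksBlock_eq he]
    exact ConfigOK.Reads.codebooks
  | sorted_values i hi hse =>
    rw [(ConfigOK.codebooks_eq he).2] at hi
    obtain ⟨eblock, ese⟩ := h.svBlock_eq he hcbk i hi
    rw [ese] at hse
    rw [eblock]
    exact ConfigOK.Reads.sorted_values i hi hse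
  | lengths i hi =>
    rw [(ConfigOK.codebooks_eq he).2] at hi
    rw [h.clBlock_eq he hcbk i hi]
    exact ConfigOK.Reads.lengths i hi
  | floor =>
    rw [FloorHdrEq.floorBlock_eq (FloorHdrEq.of_objEq (he.sub (by decide)))]
    exact ConfigOK.Reads.floor
  | residue ho =>
    apply ConfigOK.Reads.residue
    apply h.residue.owns_back (he.sub (by decide)) _ ho
    intro B' hR'
    cases hR' with
    | owns ho' => exact hk B' (ConfigOK.Reads.residue ho')
    | codebooks => exact hcbk
  | mapping ho =>
    have htab := hk _ (ConfigOK.Reads.mapping MappingOK.Owns.table)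
    exact ConfigOK.Reads.mapping (MappingOK.owns_back (he.sub (by decide)) htab ho)
  | mdct hr =>
    exact ConfigOK.Reads.mdct (Mdct.MdctOK.reads_back (he.sub (by decide)) hr)

/-- The sample-buffer pointers and sizes follow the object. -/
theorem ConfigOK.buffers_eq {mem mem' : Mem} {p f : Nat} (he : ObjEq ConfigOK.wins mem p mem' f)
    (hC : stb_vorbis.channels mem p ≤ 16) :
    stb_vorbis.channels mem' f = stb_vorbis.channels mem p ∧ bsize mem' f 1 = bsize mem p 1 ∧
    (∀ c : Nat, (c : Int) < stb_vorbis.channels mem p →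
      stb_vorbis.channel_buffers mem' f c = stb_vorbis.channel_buffers mem p c ∧
      stb_vorbis.previous_window mem' f c = stb_vorbis.previous_window mem p c ∧
      stb_vorbis.finalY mem' f c = stb_vorbis.finalY mem p c) := by
  have hr : Mdct.ReadsEq mem p mem' f := Mdct.ReadsEq.of_objEq (he.sub (by decide))
  refine ⟨hr.channels, hr.bsize 1, ?_⟩
  intro c hc
  have hc16 : c < 16 := by omega
  refine ⟨hr.channel_buffers c hc16, hr.previous_window c hc16, ?_⟩
  simp only [vacc, voff]
  exact he.u64_elem 1264 1392 (by decide) _ _ (by omega) (by omega)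

end Vorbis
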